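-- pv_equiv track=rewrite | github.com/WwAaNnGgJjIiPpEeNnGg/pythonProject | GUI/adbGui.py | translate_to_chinese
-- ===== SOURCE A (Python) =====
-- def translate_to_chinese(text):
--     translation_dict = {
--         'Current Battery Service state:': '当前电池状态:',
--         'AC powered:': '交流供电:',
--         'USB powered:': 'USB供电:',
--         'Wireless powered:': '无线供电:',
--         'Max charging current:': '最大充电电流:',
--         'Max charging voltage:': '最大充电电压:',
--         'Charge counter:': '充电计数:',
--         'status:': '状态:',
--         'health:': '健康状态:',
--         'present:': '电池是否存在:',
--         'level:': '电量:',
--         'scale:': '电量刻度:',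
--         'voltage:': '电压:',
--         'temperature:': '温度:',
--         'technology:': '电池技术:',
--         'Li-poly': '锂聚合物'
--         # 可以继续添加更多翻译
--     }
--
--     translated_lines = []
--     for line in text.split('\n'):
--         for eng, chi in translation_dict.items():
--             if eng in line:
--                 line = line.replace(eng, chi)
--         translated_lines.append(line)
--
--     return '\n'.join(translated_lines)
-- ===== SOURCE B (Python) =====
-- _TABLE = (
--     ('Current Battery Service state:', '当前电池状态:'),
--     ('AC powered:', '交流供电:'),
--     ('USB powered:', 'USB供电:'),
--     ('Wireless powered:', '无线供电:'),
--     ('Max charging current:', '最大充电电流:'),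
--     ('Max charging voltage:', '最大充电电压:'),
--     ('Charge counter:', '充电计数:'),
--     ('status:', '状态:'),
--     ('health:', '健康状态:'),
--     ('present:', '电池是否存在:'),
--     ('level:', '电量:'),
--     ('scale:', '电量刻度:'),
--     ('voltage:', '电压:'),
--     ('temperature:', '温度:'),
--     ('technology:', '电池技术:'),
--     ('Li-poly', '锂聚合物'),
-- )
--
--
-- def translate_to_chinese(text):
--     # one left-to-right pass over the whole text: at each position emit the
--     # translation of the first table key starting there, else copy one char
--     out = []
--     i = 0
--     n = len(text)
--     while i < n:
--         for eng, chi in _TABLE: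
--             if text.startswith(eng, i):
--                 out.append(chi)
--                 i += len(eng)
--                 break
--         else:
--             out.append(text[i])
--             i += 1
--     return ''.join(out)
-- ===== Notes on version B (the rewrite author's own statement) =====
-- stated objective: alternative
-- what changed: Replaced the per-line loop that runs 16 guarded str.replace passes with a single left-to-right scan over the whole text that emits the translation of the first table key matching at each position (no line splitting, one pass).
import Mathlib
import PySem

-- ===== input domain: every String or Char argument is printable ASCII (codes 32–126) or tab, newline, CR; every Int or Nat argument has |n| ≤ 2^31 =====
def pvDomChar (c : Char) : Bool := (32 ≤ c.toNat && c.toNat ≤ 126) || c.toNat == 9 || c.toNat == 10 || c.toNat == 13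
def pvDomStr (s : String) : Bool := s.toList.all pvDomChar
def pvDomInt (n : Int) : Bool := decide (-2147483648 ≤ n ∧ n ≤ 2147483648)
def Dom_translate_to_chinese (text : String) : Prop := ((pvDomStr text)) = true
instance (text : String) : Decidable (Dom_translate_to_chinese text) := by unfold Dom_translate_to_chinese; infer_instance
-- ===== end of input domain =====

-- B replaces A's per-line loop of 16 guarded str.replace passes by one left-to-right scan
-- over the whole text emitting the translation of the first table key matching at each
-- position (objective: alternative algorithm of similar cost).

-- ===== PORT A =====
-- the Python dict literal, as an insertion-ordered association list
def pvDictA : List (String × String) :=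
  [("Current Battery Service state:", "当前电池状态:"),
   ("AC powered:", "交流供电:"),
   ("USB powered:", "USB供电:"),
   ("Wireless powered:", "无线供电:"),
   ("Max charging current:", "最大充电电流:"),
   ("Max charging voltage:", "最大充电电压:"),
   ("Charge counter:", "充电计数:"),
   ("status:", "状态:"),
   ("health:", "健康状态:"),
   ("present:", "电池是否存在:"),
   ("level:", "电量:"),
   ("scale:", "电量刻度:"),
   ("voltage:", "电压:"),
   ("temperature:", "温度:"),
   ("technology:", "电池技术:"),
   ("Li-poly", "锂聚合物")]

def translate_to_chinese (text : String) : String :=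
  PySem.Str.join "\n"
    (((PySem.Str.split? text "\n").getD []).map (fun line =>
      pvDictA.foldl
        (fun ln p => if PySem.Str.isIn p.1 ln then PySem.Str.replace ln p.1 p.2 else ln)
        line))

-- ===== PORT B =====
-- Source B's module-level table, over char lists
def pvTbl : List (List Char × List Char) :=
  [("Current Battery Service state:".toList, "当前电池状态:".toList),
   ("AC powered:".toList, "交流供电:".toList),
   ("USB powered:".toList, "USB供电:".toList),
   ("Wireless powered:".toList, "无线供电:".toList),
   ("Max charging current:".toList, "最大充电电流:".toList),
   ("Max charging voltage:".toList, "最大充电电压:".toList),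
   ("Charge counter:".toList, "充电计数:".toList),
   ("status:".toList, "状态:".toList),
   ("health:".toList, "健康状态:".toList),
   ("present:".toList, "电池是否存在:".toList),
   ("level:".toList, "电量:".toList),
   ("scale:".toList, "电量刻度:".toList),
   ("voltage:".toList, "电压:".toList),
   ("temperature:".toList, "温度:".toList),
   ("technology:".toList, "电池技术:".toList),
   ("Li-poly".toList, "锂聚合物".toList)]

-- Source B's while loop: at each position, the first key starting there (inner for/break
-- = List.find?) is translated; otherwise one char is copied
def pvScan : List Char → List Char
  | [] => []
  | c :: t =>
    match pvTbl.find? (fun p => p.1.isPrefixOf (c :: t)) with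
    | some kv => kv.2 ++ pvScan (t.drop (kv.1.length - 1))
    | none => c :: pvScan t
termination_by l => l.length
decreasing_by
  all_goals (simp; try omega)

def translate_to_chinese_alt (text : String) : String :=
  String.ofList (pvScan text.toList)

-- ===== PRECONDITION & SPEC =====
def Spec_translate_to_chinese (text : String) (out : String) : Prop := out = translate_to_chinese_alt text
instance (text : String) (out : String) : Decidable (Spec_translate_to_chinese text out) := by unfold Spec_translate_to_chinese; infer_instance

-- ===== CLAIM (what is proved, stated in full; the proofs are below) =====
def Claim_equal_translate_to_chinese : Prop := ∀ (text : String), Dom_translate_to_chinese text → Spec_translate_to_chinese text (translate_to_chinese text)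

-- ===== LEMMAS AND PROOFS =====

-- fuel-free form of Python's str.replace (leftmost, non-overlapping)
def pvRepl (k v : List Char) : List Char → List Char
  | [] => []
  | c :: t =>
    if k ≠ [] ∧ k.isPrefixOf (c :: t) then v ++ pvRepl k v (t.drop (k.length - 1))
    else c :: pvRepl k v t
termination_by l => l.length
decreasing_by
  all_goals (simp; try omega)

-- a and q diverge: neither is a prefix of the other
def pvDivB (a q : List Char) : Bool := !(a.isPrefixOf q || q.isPrefixOf a)
-- q diverges from every nonempty suffix-start of x: no q-match can begin inside x
def pvDivAllB (x q : List Char) : Bool := (List.range x.length).all fun p => pvDivB (x.drop p) q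
-- every later key diverges from all positions inside every earlier key
def pvOkB : List (List Char) → Bool
  | [] => true
  | q :: rest => rest.all (fun x => pvDivAllB x q) && pvOkB rest

-- simple line splitter on '\n'
def pvConsHead (c : Char) : List (List Char) → List (List Char)
  | [] => [[c]]
  | p :: ps => (c :: p) :: ps
def pvSplitNl : List Char → List (List Char)
  | [] => [[]]
  | c :: t => if c = '\n' then [] :: pvSplitNl t else pvConsHead c (pvSplitNl t)
def pvConsPre (p : List Char) : List (List Char) → List (List Char)
  | [] => [p]
  | q :: qs => (p ++ q) :: qs

def pvFold (l : List Char) : List Char :=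
  pvTbl.foldl (fun ln p => pvRepl p.1 p.2 ln) l

-- ---- concrete facts about the table (decided) ----
lemma pv_fact_ok : pvOkB (pvTbl.map (·.1)) = true := by decide
lemma pv_fact_keys_ne : ∀ p ∈ pvTbl, p.1 ≠ [] := by decide
lemma pv_fact_val_div_b : (pvTbl.all fun p => pvTbl.all fun q => pvDivAllB p.2 q.1) = true := by
  decide
lemma pv_fact_val_div : ∀ p ∈ pvTbl, ∀ q ∈ pvTbl, pvDivAllB p.2 q.1 = true := by
  simpa [List.all_eq_true] using pv_fact_val_div_b
-- no nonempty proper suffix of a key is prefix-compatible with a value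
lemma pv_fact_sfx_b : (pvTbl.all fun q => (List.range q.1.length).all fun j =>
    decide (j = 0) || pvTbl.all fun p => pvDivB p.2 (q.1.drop j)) = true := by decide
lemma pv_fact_sfx : ∀ q ∈ pvTbl, ∀ j, 0 < j → j < q.1.length → ∀ p ∈ pvTbl,
    pvDivB p.2 (q.1.drop j) = true := by
  have h := pv_fact_sfx_b
  simp only [List.all_eq_true, List.mem_range, Bool.or_eq_true, decide_eq_true_eq] at h
  intro q hq j hj hjl p hp
  rcases h q hq j hjl with h1 | h1
  · omega
  · exact h1 p hp
lemma pv_fact_nl : ∀ p ∈ pvTbl, ('\n' : Char) ∉ p.1 := by decide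
lemma pv_fact_tblA : pvDictA.map (fun p => (p.1.toList, p.2.toList)) = pvTbl := by decide

-- ---- generic list helpers ----
lemma pv_prefix_append_cases {k x r : List Char} (h : k <+: x ++ r) : k <+: x ∨ x <+: k := by
  rcases h with ⟨s, hs⟩
  rcases List.append_eq_append_iff.mp hs.symm with ⟨a, ha1, _⟩ | ⟨c, hc1, _⟩
  · exact Or.inr ⟨a, ha1.symm⟩
  · exact Or.inl ⟨c, hc1.symm⟩

lemma pv_not_prefix_append {a q : List Char} (hd : pvDivB a q = true) (r : List Char) :
    ¬ q <+: a ++ r := by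
  intro h
  simp only [pvDivB, Bool.not_eq_eq_eq_not, Bool.not_true, Bool.or_eq_false_iff] at hd
  rcases pv_prefix_append_cases h with h1 | h1
  · rw [← List.isPrefixOf_iff_prefix] at h1; simp [hd.2] at h1
  · rw [← List.isPrefixOf_iff_prefix] at h1; simp [hd.1] at h1

lemma pv_divAll_drop {x q : List Char} (h : pvDivAllB x q = true) {p : ℕ} (hp : p < x.length) :
    pvDivB (x.drop p) q = true := by
  simp only [pvDivAllB, List.all_eq_true, List.mem_range] at h
  exact h p hp

lemma pv_divAll_tail {c : Char} {x q : List Char} (h : pvDivAllB (c :: x) q = true) :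
    pvDivAllB x q = true := by
  simp only [pvDivAllB, List.all_eq_true, List.mem_range] at h ⊢
  intro p hp
  have := h (p + 1) (by simpa using hp)
  simpa using this

-- ---- replace bridge ----
lemma pv_repl_go (k v : List Char) (hk : k ≠ []) :
    ∀ fuel (l acc : List Char), l.length ≤ fuel →
      PySem.Chars.replace.go k v fuel l acc = acc.reverse ++ pvRepl k v l := by
  intro fuel
  induction fuel with
  | zero =>
    intro l acc h
    have hl : l = [] := by cases l <;> simp_all
    subst hl
    simp [PySem.Chars.replace.go, pvRepl]
  | succ n ih =>
    intro l acc h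
    cases l with
    | nil => simp [PySem.Chars.replace.go, pvRepl]
    | cons c t =>
      obtain ⟨k0, k', rfl⟩ : ∃ k0 k', k = k0 :: k' := by
        cases k with
        | nil => exact absurd rfl hk
        | cons a b => exact ⟨a, b, rfl⟩
      by_cases hp : (k0 :: k').isPrefixOf (c :: t)
      · have hgo : PySem.Chars.replace.go (k0 :: k') v (n + 1) (c :: t) acc =
            PySem.Chars.replace.go (k0 :: k') v n (List.drop (k0 :: k').length (c :: t))
              (v.reverse ++ acc) := by
          simp [PySem.Chars.replace.go, hp]
        rw [hgo]
        have hdrop : List.drop (k0 :: k').length (c :: t) = t.drop ((k0 :: k').length - 1) := by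
          simp
        have hlen : (t.drop ((k0 :: k').length - 1)).length ≤ n := by
          simp at h ⊢; omega
        rw [hdrop, ih _ _ hlen]
        have hrepl : pvRepl (k0 :: k') v (c :: t) =
            v ++ pvRepl (k0 :: k') v (t.drop ((k0 :: k').length - 1)) := by
          rw [pvRepl]; rw [if_pos ⟨by simp, hp⟩]
        rw [hrepl]
        simp
      · have hgo : PySem.Chars.replace.go (k0 :: k') v (n + 1) (c :: t) acc =
            PySem.Chars.replace.go (k0 :: k') v n t (c :: acc) := by
          simp [PySem.Chars.replace.go, hp]
        rw [hgo, ih _ _ (by simp at h; omega)]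
        have hrepl : pvRepl (k0 :: k') v (c :: t) = c :: pvRepl (k0 :: k') v t := by
          rw [pvRepl]; rw [if_neg (by simp [hp])]
        rw [hrepl]
        simp

lemma pv_replace_eq_repl (l k v : List Char) (hk : k ≠ []) :
    PySem.Chars.replace l k v = pvRepl k v l := by
  rw [PySem.Chars.replace]
  rw [if_neg (by simp [hk]), pv_repl_go k v hk l.length l [] le_rfl]
  simp

lemma pv_repl_of_not_infix {k : List Char} (v : List Char) :
    ∀ l, ¬ k <:+: l → pvRepl k v l = l := by
  have main : ∀ n l, l.length ≤ n → ¬ k <:+: l → pvRepl k v l = l := by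
    intro n
    induction n with
    | zero =>
      intro l h _
      have : l = [] := by cases l <;> simp_all
      subst this; simp [pvRepl]
    | succ n ih =>
      intro l h hinf
      cases l with
      | nil => simp [pvRepl]
      | cons c t =>
        rw [pvRepl, if_neg, ih t (by simp at h; omega)
          (fun hx => hinf (hx.trans (List.suffix_cons c t).isInfix))]
        rintro ⟨-, hp⟩
        exact hinf (List.isPrefixOf_iff_prefix.mp hp).isInfix
  exact fun l => main l.length l le_rfl

-- ---- no-interference lemmas ----
-- Q: a replace pass slides over a block it diverges from everywhere
lemma pv_repl_append {x q w : List Char} (h : pvDivAllB x q = true) :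
    ∀ r, pvRepl q w (x ++ r) = x ++ pvRepl q w r := by
  induction x with
  | nil => intro r; simp
  | cons c x' ih =>
    intro r
    have hdiv : pvDivB (c :: x') q = true := by
      have := pv_divAll_drop h (p := 0) (by simp)
      simpa using this
    rw [List.cons_append, pvRepl, if_neg]
    · rw [ih (pv_divAll_tail h) r, List.cons_append]
    · rintro ⟨-, hp⟩
      exact pv_not_prefix_append hdiv r (by simpa using List.isPrefixOf_iff_prefix.mp hp)

lemma pv_fold_append {x : List Char} :
    ∀ (S : List (List Char × List Char)), (∀ p ∈ S, pvDivAllB x p.1 = true) →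
      ∀ r, S.foldl (fun ln p => pvRepl p.1 p.2 ln) (x ++ r) =
        x ++ S.foldl (fun ln p => pvRepl p.1 p.2 ln) r := by
  intro S
  induction S with
  | nil => intro _ r; simp
  | cons p S' ih =>
    intro hS r
    simp only [List.foldl_cons]
    rw [pv_repl_append (hS p (List.mem_cons_self)) r]
    exact ih (fun p2 h2 => hS p2 (List.mem_cons_of_mem _ h2)) _

-- P: a replace pass cannot create a new key occurrence at a position it did not touch
lemma pv_prefix_of_prefix_repl {k w : List Char} :
    ∀ l q, (∀ s, s <:+ q → s ≠ [] → pvDivB w s = true) → q <+: pvRepl k w l → q <+: l := by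
  have main : ∀ n l q, l.length ≤ n → (∀ s, s <:+ q → s ≠ [] → pvDivB w s = true) →
      q <+: pvRepl k w l → q <+: l := by
    intro n
    induction n with
    | zero =>
      intro l q h _ hq
      have : l = [] := by cases l <;> simp_all
      subst this
      simpa [pvRepl] using hq
    | succ n ih =>
      intro l q h hdiv hq
      cases l with
      | nil => simpa [pvRepl] using hq
      | cons c t =>
        rw [pvRepl] at hq
        by_cases hp : k ≠ [] ∧ k.isPrefixOf (c :: t)
        · rw [if_pos hp] at hq
          cases q with
          | nil => exact List.nil_prefix
          | cons d q' =>
            exact absurd hq (pv_not_prefix_append (hdiv _ (List.suffix_refl _) (by simp)) _)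
        · rw [if_neg hp] at hq
          cases q with
          | nil => exact List.nil_prefix
          | cons d q' =>
            rw [List.cons_prefix_cons] at hq ⊢
            refine ⟨hq.1, ih t q' (by simp at h; omega) ?_ hq.2⟩
            exact fun s hs => hdiv s (hs.trans (List.suffix_cons d q'))
  exact fun l q => main l.length l q le_rfl

-- C: if no key matches at the head, every pass keeps the head char
lemma pv_fold_cons {c : Char} :
    ∀ (S : List (List Char × List Char)) (t : List Char), (∀ p ∈ S, p ∈ pvTbl) →
      (∀ p ∈ S, ¬ p.1 <+: (c :: t)) →
      S.foldl (fun ln p => pvRepl p.1 p.2 ln) (c :: t) =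
        c :: S.foldl (fun ln p => pvRepl p.1 p.2 ln) t := by
  intro S
  induction S with
  | nil => intro t _ _; simp
  | cons p S' ih =>
    intro t hsub hne
    simp only [List.foldl_cons]
    have hstep : pvRepl p.1 p.2 (c :: t) = c :: pvRepl p.1 p.2 t := by
      rw [pvRepl, if_neg]
      rintro ⟨-, hp⟩
      exact hne p List.mem_cons_self (List.isPrefixOf_iff_prefix.mp hp)
    rw [hstep]
    refine ih (pvRepl p.1 p.2 t) (fun p2 h2 => hsub p2 (List.mem_cons_of_mem _ h2)) ?_
    intro p2 h2 hpre
    apply hne p2 (List.mem_cons_of_mem _ h2)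
    cases hq : p2.1 with
    | nil => exact List.nil_prefix
    | cons d q' =>
      rw [hq] at hpre
      rw [List.cons_prefix_cons] at hpre ⊢
      refine ⟨hpre.1, ?_⟩
      refine pv_prefix_of_prefix_repl t q' ?_ hpre.2
      intro s hs hs0
      obtain ⟨u, hu⟩ := hs
      have hsfx : s = p2.1.drop (u.length + 1) := by
        rw [hq, ← hu]
        simp
      rw [hsfx]
      refine pv_fact_sfx p2 (hsub p2 (List.mem_cons_of_mem _ h2)) (u.length + 1) (by omega) ?_
        p (hsub p List.mem_cons_self)
      have hlen2 : p2.1.length = u.length + 1 + s.length := by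
        rw [hq, ← hu]; simp; try omega
      have hs0' : 0 < s.length := List.length_pos_of_ne_nil hs0
      omega

lemma pv_fold_nil (S : List (List Char × List Char)) :
    S.foldl (fun ln p => pvRepl p.1 p.2 ln) [] = [] := by
  induction S with
  | nil => rfl
  | cons p S' ih => simpa [pvRepl] using ih

lemma pv_ok_later :
    ∀ (L1 : List (List Char)) {L L2 : List (List Char)} {k q : List Char},
      pvOkB L = true → L = L1 ++ k :: L2 → q ∈ L1 → pvDivAllB k q = true := by
  intro L1
  induction L1 with
  | nil => intro L L2 k q _ _ hq; simp at hq
  | cons a L1' ih =>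
    intro L L2 k q hok hL hq
    subst hL
    simp only [List.cons_append, pvOkB, Bool.and_eq_true] at hok
    rcases List.mem_cons.mp hq with rfl | hq'
    · have := List.all_eq_true.mp hok.1 k (by simp)
      exact this
    · exact ih hok.2 rfl hq'

lemma pv_repl_self {k : List Char} (v : List Char) (hk : k ≠ []) (X : List Char) :
    pvRepl k v (k ++ X) = v ++ pvRepl k v X := by
  obtain ⟨k0, k', rfl⟩ : ∃ k0 k', k = k0 :: k' := by
    cases k with
    | nil => exact absurd rfl hk
    | cons a b => exact ⟨a, b, rfl⟩
  rw [List.cons_append, pvRepl, if_pos ⟨by simp, by simp [List.isPrefixOf_iff_prefix]⟩]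
  simp

-- ---- MAIN: the 16 sequential replace passes equal the single scan ----
lemma pv_main : ∀ l, pvFold l = pvScan l := by
  have main : ∀ n l, l.length ≤ n → pvFold l = pvScan l := by
    intro n
    induction n with
    | zero =>
      intro l h
      have : l = [] := by cases l <;> simp_all
      subst this
      rw [pvFold, pv_fold_nil, pvScan]
    | succ n ih =>
      intro l h
      cases l with
      | nil => rw [pvFold, pv_fold_nil, pvScan]
      | cons c t =>
        rcases hf : pvTbl.find? (fun p => p.1.isPrefixOf (c :: t)) with _ | kv
        · have hnone := List.find?_eq_none.mp hf
          have hstep : pvFold (c :: t) = c :: pvFold t := by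
            rw [pvFold, pvFold]
            exact pv_fold_cons pvTbl t (fun p hp => hp)
              (fun p hp hpre => by
                have := hnone p hp
                rw [List.isPrefixOf_iff_prefix] at this
                simp [hpre] at this)
          rw [hstep, ih t (by simp at h; omega), pvScan, hf]
        · obtain ⟨hpred, T1, T2, hT, hprev⟩ := List.find?_eq_some_iff_append.mp hf
          have hk_mem : kv ∈ pvTbl := by rw [hT]; exact List.mem_append_right _ List.mem_cons_self
          have hkne : kv.1 ≠ [] := pv_fact_keys_ne kv hk_mem
          have hkpre : kv.1 <+: c :: t := List.isPrefixOf_iff_prefix.mp hpred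
          obtain ⟨r, hr⟩ := hkpre
          have hklen : 0 < kv.1.length := List.length_pos_of_ne_nil hkne
          have hdrop : t.drop (kv.1.length - 1) = r := by
            have h1 : (kv.1 ++ r).drop kv.1.length = r := by simp
            rw [hr] at h1
            obtain ⟨k0, k', hk⟩ : ∃ k0 k', kv.1 = k0 :: k' := by
              cases hx : kv.1 with
              | nil => exact absurd hx hkne
              | cons a b => exact ⟨a, b, rfl⟩
            rw [hk] at h1 ⊢
            simpa using h1
          have hkeys : pvTbl.map (·.1) = T1.map (·.1) ++ kv.1 :: T2.map (·.1) := by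
            rw [hT]; simp
          have h1 : ∀ p ∈ T1, pvDivAllB kv.1 p.1 = true := by
            intro p hp
            exact pv_ok_later (T1.map (·.1)) pv_fact_ok hkeys (List.mem_map_of_mem hp)
          have h2 : ∀ p ∈ T2, pvDivAllB kv.2 p.1 = true := by
            intro p hp
            exact pv_fact_val_div kv hk_mem p
              (by rw [hT]; exact List.mem_append_right _ (List.mem_cons_of_mem _ hp))
          have hrlen : r.length ≤ n := by
            have : (c :: t).length = kv.1.length + r.length := by rw [← hr]; simp
            simp at h this; omega
          have hfold : pvFold (c :: t) = kv.2 ++ pvFold r := by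
            rw [pvFold, pvFold, ← hr, hT]
            rw [List.foldl_append, List.foldl_append, List.foldl_cons, List.foldl_cons]
            rw [pv_fold_append T1 h1 r]
            rw [pv_repl_self kv.2 hkne]
            rw [pv_fold_append T2 h2]
          rw [hfold, ih r hrlen, pvScan, hf]
          simp [hdrop]
  exact fun l => main l.length l le_rfl

-- ---- split bridge ----
lemma pv_splitNl_ne_nil : ∀ l, pvSplitNl l ≠ [] := by
  intro l
  induction l with
  | nil => simp [pvSplitNl]
  | cons c t ih =>
    rw [pvSplitNl]
    split
    · simp
    · cases h : pvSplitNl t <;> simp [pvConsHead]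

lemma pv_splitOn_go_eq :
    ∀ fuel (l cur : List Char) (accs : List (List Char)), l.length < fuel →
      PySem.Chars.splitOn.go ['\n'] fuel l cur accs =
        accs.reverse ++ pvConsPre cur.reverse (pvSplitNl l) := by
  intro fuel
  induction fuel with
  | zero => intro l cur accs h; omega
  | succ n ih =>
    intro l cur accs h
    cases l with
    | nil => simp [PySem.Chars.splitOn.go, pvSplitNl, pvConsPre]
    | cons c rest =>
      by_cases hc : c = '\n'
      · subst hc
        have hgo : PySem.Chars.splitOn.go ['\n'] (n + 1) ('\n' :: rest) cur accs =
            PySem.Chars.splitOn.go ['\n'] n rest [] (cur.reverse :: accs) := by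
          simp [PySem.Chars.splitOn.go, List.isPrefixOf]
        rw [hgo, ih rest [] (cur.reverse :: accs) (by simp at h; omega)]
        rw [pvSplitNl, if_pos rfl]
        cases hs : pvSplitNl rest with
        | nil => exact absurd hs (pv_splitNl_ne_nil rest)
        | cons q qs => simp [pvConsPre]
      · have hgo : PySem.Chars.splitOn.go ['\n'] (n + 1) (c :: rest) cur accs =
            PySem.Chars.splitOn.go ['\n'] n rest (c :: cur) accs := by
          simp [PySem.Chars.splitOn.go, List.isPrefixOf, Ne.symm hc]
        rw [hgo, ih rest (c :: cur) accs (by simp at h; omega)]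
        rw [pvSplitNl, if_neg hc]
        cases hs : pvSplitNl rest with
        | nil => exact absurd hs (pv_splitNl_ne_nil rest)
        | cons q qs => simp [pvConsPre, pvConsHead]

lemma pv_splitOn_eq (l : List Char) : PySem.Chars.splitOn l ['\n'] = pvSplitNl l := by
  rw [PySem.Chars.splitOn, pv_splitOn_go_eq (l.length + 1) l [] [] (by omega)]
  cases hs : pvSplitNl l with
  | nil => exact absurd hs (pv_splitNl_ne_nil l)
  | cons q qs => simp [pvConsPre]

-- ---- scan respects lines ----
lemma pv_key_prefix_within {k a b : List Char} (hk : ('\n' : Char) ∉ k)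
    (h : k <+: a ++ '\n' :: b) : k <+: a := by
  rcases pv_prefix_append_cases h with h1 | h1
  · exact h1
  · obtain ⟨k', rfl⟩ := h1
    cases k' with
    | nil => simp
    | cons d k'' =>
      have h2 : d :: k'' <+: '\n' :: b := (List.prefix_append_right_inj a).mp h
      rw [List.cons_prefix_cons] at h2
      rcases h2 with ⟨rfl, -⟩
      simp at hk

lemma pv_find?_congr {p q : List Char × List Char → Bool} {L : List (List Char × List Char)}
    (h : ∀ x ∈ L, p x = q x) : L.find? p = L.find? q := by
  induction L with
  | nil => rfl
  | cons x L' ih =>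
    rw [List.find?_cons, List.find?_cons, h x List.mem_cons_self]
    exact match hq : q x with
    | true => rfl
    | false => ih (fun y hy => h y (List.mem_cons_of_mem _ hy))

lemma pv_scan_nl_none (b : List Char) :
    pvTbl.find? (fun p => p.1.isPrefixOf ('\n' :: b)) = none := by
  rw [List.find?_eq_none]
  intro p hp hpre
  rw [List.isPrefixOf_iff_prefix] at hpre
  cases hk : p.1 with
  | nil => exact pv_fact_keys_ne p hp hk
  | cons d k' =>
    rw [hk, List.cons_prefix_cons] at hpre
    exact pv_fact_nl p hp (by rw [hk, hpre.1]; exact List.mem_cons_self)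

lemma pv_scan_append :
    ∀ (a b : List Char), ('\n' : Char) ∉ a →
      pvScan (a ++ '\n' :: b) = pvScan a ++ '\n' :: pvScan b := by
  have main : ∀ n (a b : List Char), a.length ≤ n → ('\n' : Char) ∉ a →
      pvScan (a ++ '\n' :: b) = pvScan a ++ '\n' :: pvScan b := by
    intro n
    induction n with
    | zero =>
      intro a b h _
      have : a = [] := by cases a <;> simp_all
      subst this
      have h0 : pvScan ([] : List Char) = [] := by rw [pvScan]
      rw [List.nil_append, h0, List.nil_append, pvScan, pv_scan_nl_none b]
    | succ n ih =>
      intro a b h hnl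
      cases a with
      | nil =>
        have h0 : pvScan ([] : List Char) = [] := by rw [pvScan]
        rw [List.nil_append, h0, List.nil_append, pvScan, pv_scan_nl_none b]
      | cons c a' =>
        have hagree : pvTbl.find? (fun p => p.1.isPrefixOf (c :: (a' ++ '\n' :: b))) =
            pvTbl.find? (fun p => p.1.isPrefixOf (c :: a')) := by
          apply pv_find?_congr
          intro p hp
          rcases hb : p.1.isPrefixOf (c :: a') with _ | _
          · rcases hb2 : p.1.isPrefixOf (c :: (a' ++ '\n' :: b)) with _ | _
            · rfl
            · have h3 : p.1 <+: (c :: a') ++ '\n' :: b := by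
                simpa using List.isPrefixOf_iff_prefix.mp hb2
              have h4 := pv_key_prefix_within (pv_fact_nl p hp) h3
              rw [← List.isPrefixOf_iff_prefix, hb] at h4
              simp at h4
          · have hpre := List.isPrefixOf_iff_prefix.mp hb
            have h3 : p.1 <+: (c :: a') ++ '\n' :: b := hpre.trans (List.prefix_append _ _)
            rw [← List.isPrefixOf_iff_prefix] at h3
            simpa using h3
        rcases hf : pvTbl.find? (fun p => p.1.isPrefixOf (c :: a')) with _ | kv
        · rw [List.cons_append, pvScan, hagree, hf, pvScan, hf]
          have : pvScan (a' ++ '\n' :: b) = pvScan a' ++ '\n' :: pvScan b :=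
            ih a' b (by simp at h; omega) (fun hx => hnl (List.mem_cons_of_mem _ hx))
          simp [this]
        · have hmem : kv ∈ pvTbl := List.mem_of_find?_eq_some hf
          have hpt := List.find?_some hf
          have hkpre : kv.1 <+: c :: a' := List.isPrefixOf_iff_prefix.mp hpt
          have hklen : kv.1.length ≤ a'.length + 1 := by
            simpa using hkpre.length_le
          have hdrop : (a' ++ '\n' :: b).drop (kv.1.length - 1) =
              a'.drop (kv.1.length - 1) ++ '\n' :: b :=
            List.drop_append_of_le_length (by omega)
          rw [List.cons_append, pvScan, hagree, hf, pvScan, hf]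
          have : pvScan (a'.drop (kv.1.length - 1) ++ '\n' :: b) =
              pvScan (a'.drop (kv.1.length - 1)) ++ '\n' :: pvScan b :=
            ih _ b (by rw [List.length_drop]; simp at h; omega)
              (fun hx => hnl (List.mem_cons_of_mem _ (List.mem_of_mem_drop hx)))
          simp [hdrop, this]
  exact fun a b hnl => main a.length a b le_rfl hnl

lemma pv_splitNl_append :
    ∀ (a b : List Char), ('\n' : Char) ∉ a → pvSplitNl (a ++ '\n' :: b) = a :: pvSplitNl b := by
  intro a
  induction a with
  | nil => intro b _; rw [List.nil_append, pvSplitNl, if_pos rfl]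
  | cons c a' ih =>
    intro b hnl
    have hc : c ≠ '\n' := fun hx => hnl (hx ▸ List.mem_cons_self)
    rw [List.cons_append, pvSplitNl, if_neg hc, ih b (fun hx => hnl (List.mem_cons_of_mem _ hx))]
    rfl

lemma pv_splitNl_no_nl : ∀ l, ('\n' : Char) ∉ l → pvSplitNl l = [l] := by
  intro l
  induction l with
  | nil => intro _; rfl
  | cons c t ih =>
    intro hnl
    have hc : c ≠ '\n' := fun hx => hnl (hx ▸ List.mem_cons_self)
    rw [pvSplitNl, if_neg hc, ih (fun hx => hnl (List.mem_cons_of_mem _ hx))]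
    rfl

lemma pv_first_nl : ∀ l : List Char, ('\n' : Char) ∈ l →
    ∃ a b, l = a ++ '\n' :: b ∧ ('\n' : Char) ∉ a := by
  intro l
  induction l with
  | nil => intro h; simp at h
  | cons c t ih =>
    intro h
    by_cases hc : c = '\n'
    · subst hc
      exact ⟨[], t, by simp, by simp⟩
    · have ht : ('\n' : Char) ∈ t := by
        rcases List.mem_cons.mp h with h1 | h1
        · exact absurd h1.symm hc
        · exact h1
      obtain ⟨a, b, hab, hnl⟩ := ih ht
      refine ⟨c :: a, b, by rw [hab, List.cons_append], ?_⟩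
      intro hx
      rcases List.mem_cons.mp hx with h1 | h1
      · exact hc h1.symm
      · exact hnl h1

lemma pv_join_map_scan : ∀ l, PySem.Chars.join ['\n'] ((pvSplitNl l).map pvScan) = pvScan l := by
  have main : ∀ n l, l.length ≤ n →
      PySem.Chars.join ['\n'] ((pvSplitNl l).map pvScan) = pvScan l := by
    intro n
    induction n with
    | zero =>
      intro l h
      have : l = [] := by cases l <;> simp_all
      subst this
      rw [pvSplitNl]
      simp [PySem.Chars.join_singleton, pvScan]
    | succ n ih =>
      intro l h
      by_cases hnl : ('\n' : Char) ∈ l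
      · obtain ⟨a, b, rfl, hna⟩ := pv_first_nl l hnl
        rw [pv_splitNl_append a b hna, List.map_cons]
        cases hm : (pvSplitNl b).map pvScan with
        | nil => exact absurd (List.map_eq_nil_iff.mp hm) (pv_splitNl_ne_nil b)
        | cons m ms =>
          rw [PySem.Chars.join_cons_cons, ← hm,
            ih b (by simp at h; omega), pv_scan_append a b hna]
          simp
      · rw [pv_splitNl_no_nl l hnl, List.map_singleton, PySem.Chars.join_singleton]
  exact fun l => main l.length l le_rfl

-- ---- A-side reduction to char level ----
lemma pv_strfold_toList :
    ∀ (L : List (String × String)) (s : List Char),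
      (L.foldl (fun ln p => if PySem.Str.isIn p.1 ln then PySem.Str.replace ln p.1 p.2 else ln)
        (String.ofList s)).toList =
      (L.map (fun p => (p.1.toList, p.2.toList))).foldl
        (fun ln p => if PySem.Chars.isIn p.1 ln then PySem.Chars.replace ln p.1 p.2 else ln) s := by
  intro L
  induction L with
  | nil => intro s; simp
  | cons p L' ih =>
    intro s
    simp only [List.foldl_cons, List.map_cons]
    have hstep : (if PySem.Str.isIn p.1 (String.ofList s)
          then PySem.Str.replace (String.ofList s) p.1 p.2 else String.ofList s) =
        String.ofList (if PySem.Chars.isIn p.1.toList s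
          then PySem.Chars.replace s p.1.toList p.2.toList else s) := by
      rw [PySem.Str.isIn, String.toList_ofList]
      split
      · rw [PySem.Str.replace, String.toList_ofList]
      · rfl
    rw [hstep, ih]

lemma pv_guardfold_eq_fold (l : List Char) :
    pvTbl.foldl
      (fun ln p => if PySem.Chars.isIn p.1 ln then PySem.Chars.replace ln p.1 p.2 else ln) l =
    pvFold l := by
  rw [pvFold]
  apply PySem.List.foldl_congr_mem
  intro acc x hx
  by_cases hin : PySem.Chars.isIn x.1 acc = true
  · rw [if_pos hin, pv_replace_eq_repl acc x.1 x.2 (pv_fact_keys_ne x hx)]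
  · rw [if_neg hin,
      pv_repl_of_not_infix x.2 acc ((PySem.Chars.isIn_eq_false_iff x.1 acc).mp (by simpa using hin))]

set_option maxRecDepth 10000 in
lemma pv_A_eq (text : String) :
    translate_to_chinese text =
      String.ofList (PySem.Chars.join ['\n'] ((pvSplitNl text.toList).map pvFold)) := by
  rw [translate_to_chinese]
  rw [show PySem.Str.split? text "\n" =
      some ((PySem.Chars.splitOn text.toList ['\n']).map String.ofList) from by
    simp [PySem.Str.split?, PySem.Chars.split?]]
  rw [Option.getD_some, PySem.Str.join]
  congr 1
  rw [show ("\n" : String).toList = ['\n'] from rfl, pv_splitOn_eq]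
  rw [List.map_map, List.map_map]
  refine congrArg _ ?_
  apply List.map_congr_left
  intro cs _
  show (pvDictA.foldl _ (String.ofList cs)).toList = pvFold cs
  rw [pv_strfold_toList pvDictA cs, pv_fact_tblA, pv_guardfold_eq_fold]

-- ===== VERDICT (by name: the statement is the Claim_ definition above) =====
theorem translate_to_chinese_spec : Claim_equal_translate_to_chinese := by
  intro text _
  show _ = _
  rw [pv_A_eq, translate_to_chinese_alt]
  congr 1
  calc PySem.Chars.join ['\n'] ((pvSplitNl text.toList).map pvFold)
      = PySem.Chars.join ['\n'] ((pvSplitNl text.toList).map pvScan) := by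
        congr 1; exact List.map_congr_left (fun x _ => pv_main x)
    _ = pvScan text.toList := pv_join_map_scan text.toList
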